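-- pv_equiv track=rewrite | github.com/dLswStudy/baekjoonHub | 백준/Bronze/2775. 부녀회장이 될테야/부녀회장이 될테야.py | dp
-- ===== SOURCE A (Python) =====
-- from collections import defaultdict
--
-- memo = defaultdict(lambda: defaultdict(int))
--
-- def dp(a, b):
--     if memo[a][b]:
--         return memo[a][b]
--     else:
--         if b == 0:
--             return 0
--         elif a == 0:
--             memo[a][b] = b
--             return b
--         else:
--             memo[a][b] = dp(a, b-1) + dp(a-1, b)
--             return dp(a, b-1) + dp(a-1, b)
-- ===== SOURCE B (Python) =====
-- def dp(a, b):
--     # closed form: dp(a,b) = C(a+b, a+1), computed by the multiplicative binomial formula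
--     n = a + b
--     k = a + 1
--     if k > n:
--         return 0
--     r = 1
--     for i in range(1, k + 1):
--         r = r * (n - k + i) // i
--     return r
-- ===== Notes on version B (the rewrite author's own statement) =====
-- stated objective: faster
-- what changed: Replaces the memoized Pascal-style double recursion by the closed-form binomial coefficient C(a+b, a+1), computed with the O(a) multiplicative product formula.
-- outside the precondition, e.g. on dp(0, -3): A returns -3, B returns 0; on dp(-2, 0): A returns 0, B returns 0
import Mathlib
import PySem

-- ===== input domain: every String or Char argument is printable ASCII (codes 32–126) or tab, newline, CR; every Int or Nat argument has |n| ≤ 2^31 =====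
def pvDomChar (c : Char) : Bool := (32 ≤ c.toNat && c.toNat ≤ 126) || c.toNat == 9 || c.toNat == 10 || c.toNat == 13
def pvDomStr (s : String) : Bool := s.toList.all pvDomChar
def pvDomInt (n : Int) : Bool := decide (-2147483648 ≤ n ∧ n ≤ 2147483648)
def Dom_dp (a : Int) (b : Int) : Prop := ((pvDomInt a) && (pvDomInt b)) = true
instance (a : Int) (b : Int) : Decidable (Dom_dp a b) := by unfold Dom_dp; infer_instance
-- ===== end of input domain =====

-- B replaces A's memoized double recursion by the closed-form binomial coefficient C(a+b, a+1)
-- (multiplicative product formula), an asymptotic speed-up; return values only (A also mutates a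
-- global memo cache across calls, which affects performance, never the value returned).

-- ===== PORT A =====
-- A's global `memo = defaultdict(lambda: defaultdict(int))` is threaded through the recursion as a
-- hash map keyed by (a, b) (Python's dict IS a hash table; Std.HashMap keeps evaluation O(1) per access); `if memo[a][b]:` is `getD (a,b) 0 ≠ 0` (a defaultdict read of an
-- absent key yields the falsy 0; the 0 the defaultdict silently inserts is indistinguishable from
-- absence under this read, so getD is exact). The recursion is fueled; fuel a.toNat+b.toNat+1
-- exceeds the recursion depth on every input where the Python terminates.
def dpGo : Nat → Int → Int → Std.HashMap (Int × Int) Int → Int × Std.HashMap (Int × Int) Int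
  | 0, _, _, m => (0, m)  -- out of fuel: unreachable when the Python returns
  | f + 1, a, b, m =>
    let v := m.getD (a, b) 0
    if v ≠ 0 then (v, m)
    else if b = 0 then (0, m)
    else if a = 0 then (b, m.insert (a, b) b)
    else
      let r1 := dpGo f a (b - 1) m
      let r2 := dpGo f (a - 1) b r1.2
      let m3 := r2.2.insert (a, b) (r1.1 + r2.1)
      -- Python recomputes `dp(a, b-1) + dp(a-1, b)` for the return after storing it
      let r3 := dpGo f a (b - 1) m3
      let r4 := dpGo f (a - 1) b r3.2
      (r3.1 + r4.1, r4.2)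

def dp (a : Int) (b : Int) : Int := (dpGo (a.toNat + b.toNat + 1) a b ∅).1

-- ===== PORT B =====
def dp_alt (a : Int) (b : Int) : Int :=
  let n := a + b
  let k := a + 1
  if k > n then 0
  else (PySem.List.pyRange 1 (k + 1) 1).foldl (fun r i => PySem.Int.floordiv (r * (n - k + i)) i) 1

-- ===== PRECONDITION & SPEC =====
-- Pre_ restricts to the problem's natural domain (floor a ≥ 0, unit b ≥ 0): outside it A either
-- recurses forever (RecursionError, for a>0∧b<0 or a<0∧b>0) or returns degenerate line values
-- (b at (0,b<0), 0 at (a<0,0)) that are accidents of branch order outside the intended domain.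
def Pre_dp (a : Int) (b : Int) : Prop := 0 ≤ a ∧ 0 ≤ b
instance (a : Int) (b : Int) : Decidable (Pre_dp a b) := by unfold Pre_dp; infer_instance
def pvWitness_dp : Int × Int := (2, 3)
def Spec_dp (a : Int) (b : Int) (out : Int) : Prop := out = dp_alt a b
instance (a : Int) (b : Int) (out : Int) : Decidable (Spec_dp a b out) := by unfold Spec_dp; infer_instance

-- ===== CLAIM (what is proved, stated in full; the proofs are below) =====
def Claim_equal_dp : Prop := ∀ (a : Int) (b : Int), Dom_dp a b → Pre_dp a b → Spec_dp a b (dp a b)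

-- ===== LEMMAS AND PROOFS =====

-- the common value: C(a+b, a+1)
def dpSpec (a b : Int) : Int := (Nat.choose (a + b).toNat (a.toNat + 1) : Int)

-- every nonzero value stored in the memo is correct
def dpInv (m : Std.HashMap (Int × Int) Int) : Prop :=
  ∀ x y : Int, m.getD (x, y) 0 ≠ 0 → m.getD (x, y) 0 = dpSpec x y

lemma hashGetD_insert (m : Std.HashMap (Int × Int) Int) (k k' : Int × Int) (v : Int) :
    (m.insert k v).getD k' 0 = if k' = k then v else m.getD k' 0 := by
  rw [Std.HashMap.getD_insert]
  by_cases h : k' = k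
  · simp [h]
  · simp [h, Ne.symm h]

lemma dpInv_empty : dpInv ∅ := by
  intro x y h
  simp [Std.HashMap.getD_empty] at h

lemma dpInv_insert {m : Std.HashMap (Int × Int) Int} (h : dpInv m) (a b : Int)
    (v : Int) (hcorrect : v = dpSpec a b) :
    dpInv (m.insert (a, b) v) := by
  intro x y hne
  rw [hashGetD_insert] at hne ⊢
  by_cases hxy : (x, y) = (a, b)
  · rw [if_pos hxy] at hne ⊢
    simp only [Prod.mk.injEq] at hxy
    rw [hxy.1, hxy.2, hcorrect]
  · rw [if_neg hxy] at hne ⊢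
    exact h x y hne

lemma dpSpec_pascal (a b : Int) (ha : 1 ≤ a) (hb : 1 ≤ b) :
    dpSpec a b = dpSpec a (b - 1) + dpSpec (a - 1) b := by
  unfold dpSpec
  have h1 : (a + b).toNat = (a + (b - 1)).toNat + 1 := by omega
  have h2 : (a - 1 + b).toNat = (a + (b - 1)).toNat := by omega
  have h3 : (a - 1).toNat + 1 = a.toNat := by omega
  rw [h1, h2, h3]
  rw [Nat.choose_succ_succ ((a + (b - 1)).toNat) (a.toNat)]
  push_cast
  ring

lemma dpGo_ok (fuel : Nat) : ∀ (a b : Int) (m : Std.HashMap (Int × Int) Int),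
    0 ≤ a → 0 ≤ b → (a + b).toNat < fuel → dpInv m →
    (dpGo fuel a b m).1 = dpSpec a b ∧ dpInv (dpGo fuel a b m).2 := by
  induction fuel with
  | zero => intro a b m ha hb hf _; omega
  | succ f ih =>
    intro a b m ha hb hf hm
    rw [dpGo]
    by_cases hv : m.getD (a, b) 0 ≠ 0
    · rw [if_pos hv]
      exact ⟨hm a b hv, hm⟩
    · rw [if_neg hv]
      by_cases hb0 : b = 0
      · rw [if_pos hb0]
        subst hb0
        refine ⟨?_, hm⟩
        show (0 : Int) = dpSpec a 0
        unfold dpSpec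
        rw [Nat.choose_eq_zero_of_lt (by omega)]
        simp
      · rw [if_neg hb0]
        by_cases ha0 : a = 0
        · rw [if_pos ha0]
          have hspec : b = dpSpec 0 b := by
            unfold dpSpec
            simp only [Int.zero_add, Int.toNat_zero, Nat.zero_add, Nat.choose_one_right]
            omega
          subst ha0
          exact ⟨hspec, dpInv_insert hm 0 b b hspec⟩
        · rw [if_neg ha0]
          dsimp only
          have ha1 : 1 ≤ a := by omega
          have hb1 : 1 ≤ b := by omega
          have hf1 : (a + (b - 1)).toNat < f := by omega
          have hf2 : (a - 1 + b).toNat < f := by omega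
          obtain ⟨e1, i1⟩ := ih a (b - 1) m ha (by omega) hf1 hm
          obtain ⟨e2, i2⟩ := ih (a - 1) b _ (by omega) hb hf2 i1
          have i3 : dpInv ((dpGo f (a - 1) b (dpGo f a (b - 1) m).2).2.insert (a, b)
              ((dpGo f a (b - 1) m).1 + (dpGo f (a - 1) b (dpGo f a (b - 1) m).2).1)) := by
            apply dpInv_insert i2 a b
            rw [e1, e2, dpSpec_pascal a b ha1 hb1]
          obtain ⟨e3, i4⟩ := ih a (b - 1) _ ha (by omega) hf1 i3
          obtain ⟨e4, i5⟩ := ih (a - 1) b _ (by omega) hb hf2 i4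
          exact ⟨by rw [e3, e4, dpSpec_pascal a b ha1 hb1], i5⟩

lemma dp_eq_spec (a b : Int) (ha : 0 ≤ a) (hb : 0 ≤ b) : dp a b = dpSpec a b := by
  unfold dp
  exact (dpGo_ok (a.toNat + b.toNat + 1) a b ∅ ha hb (by omega) dpInv_empty).1

-- B's multiplicative loop up to j computes C(n-k+j, j)
lemma dp_alt_loop (n k : Int) (hkn : k ≤ n) :
    ∀ j : Nat, (j : Int) ≤ k →
      (PySem.List.pyRange 1 ((j : Int) + 1) 1).foldl
        (fun r i => PySem.Int.floordiv (r * (n - k + i)) i) 1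
      = (Nat.choose (n - k + (j : Int)).toNat j : Int) := by
  intro j
  induction j with
  | zero => intro _; simp [PySem.List.pyRange]
  | succ j ih =>
    intro hj
    have hcast : ((j + 1 : Nat) : Int) = (j : Int) + 1 := by push_cast; ring
    rw [hcast] at hj ⊢
    have hj' : (j : Int) ≤ k := by omega
    rw [PySem.List.pyRange_one_succ_right (by omega : (1 : Int) ≤ (j : Int) + 1),
        List.foldl_append, ih hj']
    simp only [List.foldl_cons, List.foldl_nil]
    have hmn : (0 : Int) ≤ n - k + (j : Int) := by omega
    set m : Nat := (n - k + (j : Int)).toNat with hm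
    have hm' : n - k + ((j : Int) + 1) = ((m + 1 : Nat) : Int) := by omega
    rw [hm']
    have harg : ((Nat.choose m j : Int)) * ((m + 1 : Nat) : Int)
        = ((Nat.choose (m + 1) (j + 1) * (j + 1) : Nat) : Int) := by
      push_cast [← Nat.add_one_mul_choose_eq]
      ring
    rw [harg, show (j : Int) + 1 = ((j + 1 : Nat) : Int) by push_cast; ring,
        PySem.Int.floordiv_natCast]
    have hdiv : Nat.choose (m + 1) (j + 1) * (j + 1) / (j + 1) = Nat.choose (m + 1) (j + 1) :=
      Nat.mul_div_cancel _ (by omega)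
    rw [hdiv]
    simp

lemma dp_alt_eq_spec (a b : Int) (ha : 0 ≤ a) (hb : 0 ≤ b) : dp_alt a b = dpSpec a b := by
  unfold dp_alt dpSpec
  by_cases h : a + 1 > a + b
  · have hb0 : b = 0 := by omega
    rw [if_pos h, Nat.choose_eq_zero_of_lt (by omega)]
    simp
  · rw [if_neg h]
    have hk : 1 ≤ a + 1 := by omega
    have hkn : a + 1 ≤ a + b := by omega
    have hj : ((a.toNat + 1 : Nat) : Int) = a + 1 := by omega
    have := dp_alt_loop (a + b) (a + 1) hkn (a.toNat + 1) (by omega)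
    rw [hj] at this
    rw [this]
    congr 2
    omega

-- ===== VERDICT (by name: the statement is the Claim_ definition above) =====
theorem dp_spec : Claim_equal_dp := by
  intro a b _ hpre
  show dp a b = dp_alt a b
  rw [dp_eq_spec a b hpre.1 hpre.2, dp_alt_eq_spec a b hpre.1 hpre.2]
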